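-- pv_equiv track=rewrite | github.com/autistic-symposium/master-algorithms-py | src/extra_interview_problems/math_arrays_and_strings/delete_duplicate_char_str.py | delete_unique
-- ===== SOURCE A (Python) =====
-- from collections import Counter
--
-- def delete_unique(str1):
--     '''
--     >>> delete_unique("Trust no one")
--     'on'
--     >>> delete_unique("Mulder?")
--     ''
--     '''
--
--     str_strip = ''.join(str1.split())
--     repeat = Counter()
--
--     for c in str_strip:
--         repeat[c] += 1
--
--     result = ''
--     for c, count in repeat.items():
--         if count > 1:
--             result += c
--
--     return result
-- ===== SOURCE B (Python) =====
-- def delete_unique(str1):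
--     s = ''.join(str1.split())
--     result = ''
--     for c in s:
--         if s.count(c) > 1 and c not in result:
--             result += c
--     return result
-- ===== Notes on version B (the rewrite author's own statement) =====
-- stated objective: simpler
-- what changed: Replaces the Counter table and second pass over its items by a single pass over the stripped string that appends a character when s.count(c) > 1 and it is not already in the result, which deduplicates in first-appearance order.
import Mathlib
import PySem

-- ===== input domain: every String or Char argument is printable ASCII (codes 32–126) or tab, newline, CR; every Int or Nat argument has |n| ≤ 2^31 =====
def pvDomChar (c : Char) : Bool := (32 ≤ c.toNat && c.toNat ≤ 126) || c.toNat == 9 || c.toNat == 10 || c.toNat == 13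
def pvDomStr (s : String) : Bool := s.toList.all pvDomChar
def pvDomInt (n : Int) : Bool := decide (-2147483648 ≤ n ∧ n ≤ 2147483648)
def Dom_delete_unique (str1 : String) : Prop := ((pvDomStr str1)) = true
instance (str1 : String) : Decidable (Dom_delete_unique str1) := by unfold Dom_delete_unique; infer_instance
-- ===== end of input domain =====

-- B replaces A's Counter table and items pass by a single pass over the stripped string,
-- using repeated s.count scans and a membership guard to deduplicate in first-appearance order (simpler, not faster).


-- ===== PORT A =====
def delete_unique (str1 : String) : String :=
  -- str_strip = ''.join(str1.split())
  let strStrip := PySem.Str.join "" (PySem.Str.split₀ str1)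
  -- repeat = Counter(); for c in str_strip: repeat[c] += 1
  let rep := strStrip.toList.foldl (fun d c => d.modify c 0 (· + 1)) (PySem.Dict.empty : PySem.Dict Char Int)
  -- result = ''; for c, count in repeat.items(): if count > 1: result += c
  let result := rep.items.foldl (fun r ci => if ci.2 > 1 then r ++ [ci.1] else r) ([] : List Char)
  String.mk result

-- ===== PORT B =====
def delete_unique_alt (str1 : String) : String :=
  let s := PySem.Str.join "" (PySem.Str.split₀ str1)
  let cs := s.toList
  -- 'for c in s: if s.count(c) > 1 and c not in result: result += c';
  -- for a single character c, s.count(c) is exactly the character count and 'c in result' is character membership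
  String.mk (cs.foldl (fun res c => if cs.count c > 1 ∧ c ∉ res then res ++ [c] else res) [])

-- ===== PRECONDITION & SPEC =====
def Spec_delete_unique (str1 : String) (out : String) : Prop := out = delete_unique_alt str1
instance (str1 : String) (out : String) : Decidable (Spec_delete_unique str1 out) := by unfold Spec_delete_unique; infer_instance

-- ===== CLAIM (what is proved, stated in full; the proofs are below) =====
def Claim_equal_delete_unique : Prop := ∀ (str1 : String), Dom_delete_unique str1 → Spec_delete_unique str1 (delete_unique str1)

-- ===== LEMMAS AND PROOFS =====

-- B's one-pass loop, started from a filtered accumulator, is the ordered dedup of the list filtered by p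
theorem b_loop_eq_filter_dedup (p : Char → Prop) [DecidablePred p] (l : List Char) (s : List Char) :
    l.foldl (fun res c => if p c ∧ c ∉ res then res ++ [c] else res) (s.filter (fun c => decide (p c)))
    = (l.foldl (fun res c => if c ∈ res then res else res ++ [c]) s).filter (fun c => decide (p c)) := by
  induction l generalizing s with
  | nil => simp
  | cons c l ih =>
    simp only [List.foldl_cons]
    have hstep : (if p c ∧ c ∉ s.filter (fun c => decide (p c)) then s.filter (fun c => decide (p c)) ++ [c] else s.filter (fun c => decide (p c)))
        = (if c ∈ s then s else s ++ [c]).filter (fun c => decide (p c)) := by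
      by_cases hs : c ∈ s
      · by_cases hp : p c <;> simp [hs, hp, List.mem_filter]
      · by_cases hp : p c <;> simp [hs, hp, List.mem_filter, List.filter_append]
    rw [hstep, ih]

theorem delete_unique_spec' (str1 : String) : delete_unique str1 = delete_unique_alt str1 := by
  simp only [delete_unique, delete_unique_alt]
  generalize (PySem.Str.join "" (PySem.Str.split₀ str1)).toList = cs
  -- A's counter loop is PySem.Dict.counter
  have hrep : cs.foldl (fun d c => d.modify c 0 (· + 1)) (PySem.Dict.empty : PySem.Dict Char Int)
      = PySem.Dict.counter cs := (PySem.Dict.counter_eq_foldl cs).symm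
  rw [hrep, PySem.Dict.items_counter, List.foldl_map]
  -- PySem.Set.ofList is the ordered-dedup fold
  have hset : PySem.Set.ofList cs = cs.foldl (fun res c => if c ∈ res then res else res ++ [c]) [] := by
    rw [PySem.Set.ofList.eq_def]
    congr 1
    funext s x
    rw [PySem.Set.add.eq_def]
    by_cases h : x ∈ s <;> simp [h]
  -- A side: filter of the ordered dedup
  have hA : (PySem.Set.ofList cs).foldl (fun r k => if ((cs.count k : Int)) > 1 then r ++ [k] else r) []
      = (PySem.Set.ofList cs).filter (fun k => decide (cs.count k > 1)) := by
    rw [show (fun (r : List Char) (k : Char) => if ((cs.count k : Int)) > 1 then r ++ [k] else r)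
        = (fun r k => if (fun k => decide (cs.count k > 1)) k = true then r ++ [id k] else r) by
      funext r k
      by_cases h : cs.count k > 1
      · simp [h, show ((cs.count k : Int)) > 1 by exact_mod_cast h]
      · simp [h, show ¬ ((cs.count k : Int)) > 1 by exact_mod_cast h]]
    rw [PySem.List.foldl_append_if]
    simp
  -- B side: the same filter of the same dedup
  have hB := b_loop_eq_filter_dedup (fun c => cs.count c > 1) cs []
  simp only [List.filter_nil] at hB
  rw [hA, hB, hset]

-- ===== VERDICT (by name: the statement is the Claim_ definition above) =====
theorem delete_unique_spec : Claim_equal_delete_unique := by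
  intro str1 _
  exact delete_unique_spec' str1
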